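-- pv_equiv track=rewrite | github.com/DanielKluev/pyFade | py_fade/providers/mock_provider.py | _extract_primary_user_turn
-- ===== SOURCE A (Python) =====
-- from typing import Iterator, Sequence
--
-- def _extract_primary_user_turn(messages: Sequence[dict[str, str]]) -> str:
--     if not messages:
--         return ""
--     for message in messages:
--         if message.get("role") == "user":
--             content = message.get("content", "").strip()
--             if content:
--                 return content
--     for message in messages:
--         content = message.get("content", "").strip()
--         if content:
--             return content
--     return ""
-- ===== SOURCE B (Python) =====
-- from typing import Sequence
--
-- def _extract_primary_user_turn(messages: Sequence[dict[str, str]]) -> str: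
--     fallback = ""
--     for message in messages:
--         content = message.get("content", "").strip()
--         if not content:
--             continue
--         if message.get("role") == "user":
--             return content
--         if not fallback:
--             fallback = content
--     return fallback
-- ===== Notes on version B (the rewrite author's own statement) =====
-- stated objective: simpler
-- what changed: Replaces A's two sequential scans (user-role pass, then any-role pass) with a single loop that returns at the first non-empty user message and keeps the first non-empty content of any message as a fallback.
import Mathlib
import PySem

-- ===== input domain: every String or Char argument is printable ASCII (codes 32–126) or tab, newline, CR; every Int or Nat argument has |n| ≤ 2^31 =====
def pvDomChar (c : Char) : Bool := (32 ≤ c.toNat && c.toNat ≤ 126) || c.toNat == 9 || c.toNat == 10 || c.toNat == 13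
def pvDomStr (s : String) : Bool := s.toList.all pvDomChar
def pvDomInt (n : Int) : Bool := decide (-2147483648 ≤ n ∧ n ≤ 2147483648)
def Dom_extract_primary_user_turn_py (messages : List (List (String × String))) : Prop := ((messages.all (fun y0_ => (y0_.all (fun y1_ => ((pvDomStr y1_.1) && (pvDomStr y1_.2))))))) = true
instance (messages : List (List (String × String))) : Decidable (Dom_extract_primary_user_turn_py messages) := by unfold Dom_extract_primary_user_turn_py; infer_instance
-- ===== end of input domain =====

-- ===== PORT A =====
-- Single-file header: B merges A's two sequential scans into one loop with a fallback accumulator (objective: simpler).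
-- dict lookup = first match in the association list (insertion order), as Python dict.get
def pvGetD (m : List (String × String)) (k d : String) : String :=
  match m with
  | [] => d
  | (k', v) :: rest => if k' = k then v else pvGetD rest k d

def pvGet? (m : List (String × String)) (k : String) : Option String :=
  match m with
  | [] => none
  | (k', v) :: rest => if k' = k then some v else pvGet? rest k

-- A's first for-loop: first message with role == "user" whose stripped content is non-empty
def pvLoop1 (ms : List (List (String × String))) : Option String :=
  match ms with
  | [] => none
  | m :: rest =>
    if pvGet? m "role" = some "user" then
      let content := PySem.Str.strip (pvGetD m "content" "")
      if content ≠ "" then some content else pvLoop1 rest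
    else pvLoop1 rest

-- A's second for-loop: first message with non-empty stripped content
def pvLoop2 (ms : List (List (String × String))) : Option String :=
  match ms with
  | [] => none
  | m :: rest =>
    let content := PySem.Str.strip (pvGetD m "content" "")
    if content ≠ "" then some content else pvLoop2 rest

def extract_primary_user_turn_py (messages : List (List (String × String))) : String :=
  if messages = [] then ""
  else
    match pvLoop1 messages with
    | some c => c
    | none =>
      match pvLoop2 messages with
      | some c => c
      | none => ""

-- ===== PORT B =====
-- B: one pass, fallback accumulator
def pvLoopB (ms : List (List (String × String))) (fallback : String) : String :=
  match ms with
  | [] => fallback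
  | m :: rest =>
    let content := PySem.Str.strip (pvGetD m "content" "")
    if content = "" then pvLoopB rest fallback
    else if pvGet? m "role" = some "user" then content
    else if fallback = "" then pvLoopB rest content
    else pvLoopB rest fallback

def extract_primary_user_turn_py_alt (messages : List (List (String × String))) : String :=
  pvLoopB messages ""

-- ===== PRECONDITION & SPEC =====
def Spec_extract_primary_user_turn_py (messages : List (List (String × String))) (out : String) : Prop := out = extract_primary_user_turn_py_alt messages
instance (messages : List (List (String × String))) (out : String) : Decidable (Spec_extract_primary_user_turn_py messages out) := by unfold Spec_extract_primary_user_turn_py; infer_instance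

-- ===== CLAIM (what is proved, stated in full; the proofs are below) =====
def Claim_equal_extract_primary_user_turn_py : Prop := ∀ (messages : List (List (String × String))), Dom_extract_primary_user_turn_py messages → Spec_extract_primary_user_turn_py messages (extract_primary_user_turn_py messages)

-- ===== LEMMAS AND PROOFS =====

theorem pvLoopB_eq (ms : List (List (String × String))) (fb : String) :
    pvLoopB ms fb =
      match pvLoop1 ms with
      | some c => c
      | none => if fb = "" then (pvLoop2 ms).getD "" else fb := by
  induction ms generalizing fb with
  | nil => simp [pvLoopB, pvLoop1, pvLoop2]
  | cons m rest ih =>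
    simp only [pvLoopB, pvLoop1, pvLoop2]
    by_cases hc : PySem.Str.strip (pvGetD m "content" "") = ""
    · by_cases hr : pvGet? m "role" = some "user" <;> simp [hc, hr, ih]
    · by_cases hr : pvGet? m "role" = some "user"
      · simp [hc, hr]
      · by_cases hf : fb = "" <;> simp [hc, hr, hf, ih]

-- ===== VERDICT (by name: the statement is the Claim_ definition above) =====
theorem extract_primary_user_turn_py_spec : Claim_equal_extract_primary_user_turn_py := by
  intro messages _
  unfold Spec_extract_primary_user_turn_py extract_primary_user_turn_py extract_primary_user_turn_py_alt
  rw [pvLoopB_eq]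
  cases messages with
  | nil => simp [pvLoop1, pvLoop2]
  | cons m rest =>
    simp only [if_neg (List.cons_ne_nil m rest)]
    cases pvLoop1 (m :: rest) <;> cases pvLoop2 (m :: rest) <;> simp
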